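-- pv_equiv track=rewrite | github.com/blacksoxx/vmware-migration-agent | providers/gcp/sizing_table.py | _select_vcpu_bucket
-- ===== SOURCE A (Python) =====
-- _GCP_SIZING_TABLE: dict[int, list[tuple[int, str]]] = {
--     1: [
--         (1024, "e2-micro"),
--         (2048, "e2-small"),
--     ],
--     2: [
--         (4096, "e2-medium"),
--         (8192, "e2-standard-2"),
--         (16384, "n2-standard-2"),
--     ],
--     4: [
--         (8192, "e2-standard-4"),
--         (16384, "n2-standard-4"),
--         (32768, "n2-highmem-4"),
--     ],
--     8: [
--         (16384, "e2-standard-8"),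
--         (32768, "n2-standard-8"),
--         (65536, "n2-highmem-8"),
--     ],
--     16: [
--         (32768, "n2-standard-16"),
--         (65536, "n2-standard-16"),
--         (131072, "n2-highmem-16"),
--     ],
-- }
--
-- def _select_vcpu_bucket(requested_vcpus: int) -> int:
--     if requested_vcpus in _GCP_SIZING_TABLE:
--         return requested_vcpus
--
--     available = sorted(_GCP_SIZING_TABLE)
--     for candidate in available:
--         if candidate >= requested_vcpus:
--             return candidate
--
--     return available[-1]
-- ===== SOURCE B (Python) =====
-- _GCP_SIZING_TABLE: dict[int, list[tuple[int, str]]] = {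
--     1: [
--         (1024, "e2-micro"),
--         (2048, "e2-small"),
--     ],
--     2: [
--         (4096, "e2-medium"),
--         (8192, "e2-standard-2"),
--         (16384, "n2-standard-2"),
--     ],
--     4: [
--         (8192, "e2-standard-4"),
--         (16384, "n2-standard-4"),
--         (32768, "n2-highmem-4"),
--     ],
--     8: [
--         (16384, "e2-standard-8"),
--         (32768, "n2-standard-8"),
--         (65536, "n2-highmem-8"),
--     ],
--     16: [
--         (32768, "n2-standard-16"),
--         (65536, "n2-standard-16"),
--         (131072, "n2-highmem-16"),
--     ],
-- }
--
--
-- def _select_vcpu_bucket(requested_vcpus: int) -> int: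
--     keys = sorted(_GCP_SIZING_TABLE)
--     # binary search (bisect_left): smallest index whose key >= request
--     lo, hi = 0, len(keys)
--     while lo < hi:
--         mid = (lo + hi) // 2
--         if keys[mid] < requested_vcpus:
--             lo = mid + 1
--         else:
--             hi = mid
--     return keys[lo] if lo < len(keys) else keys[-1]
-- ===== Notes on version B (the rewrite author's own statement) =====
-- stated objective: alternative
-- what changed: Replaced the dict-membership check plus linear scan over the sorted keys with a single hand-written bisect_left binary search over the sorted keys (exact matches fall out of the search, no separate membership test).
import Mathlib
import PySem

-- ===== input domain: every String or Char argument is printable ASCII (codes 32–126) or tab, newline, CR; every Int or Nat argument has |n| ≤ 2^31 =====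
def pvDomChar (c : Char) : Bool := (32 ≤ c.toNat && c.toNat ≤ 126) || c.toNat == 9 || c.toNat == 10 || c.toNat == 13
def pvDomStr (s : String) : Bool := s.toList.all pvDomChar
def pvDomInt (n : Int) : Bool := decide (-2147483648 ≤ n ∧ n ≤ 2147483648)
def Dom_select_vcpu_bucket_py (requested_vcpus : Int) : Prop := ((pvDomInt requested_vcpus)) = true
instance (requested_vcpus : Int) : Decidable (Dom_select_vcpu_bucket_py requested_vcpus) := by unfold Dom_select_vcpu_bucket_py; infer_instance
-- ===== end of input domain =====

-- B replaces A's membership test + linear scan with one hand-written bisect_left binary search (alternative decomposition, same result).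

-- ===== PORT A =====
-- the module constant _GCP_SIZING_TABLE, in insertion order
def gcpSizingTable : PySem.Dict Int (List (Int × String)) :=
  ⟨[(1, [(1024, "e2-micro"), (2048, "e2-small")]),
    (2, [(4096, "e2-medium"), (8192, "e2-standard-2"), (16384, "n2-standard-2")]),
    (4, [(8192, "e2-standard-4"), (16384, "n2-standard-4"), (32768, "n2-highmem-4")]),
    (8, [(16384, "e2-standard-8"), (32768, "n2-standard-8"), (65536, "n2-highmem-8")]),
    (16, [(32768, "n2-standard-16"), (65536, "n2-standard-16"), (131072, "n2-highmem-16")])]⟩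

-- the for-loop: first candidate ≥ requested, else none (loop falls through)
def firstGE (requested : Int) : List Int → Option Int
  | [] => none
  | c :: rest => if c ≥ requested then some c else firstGE requested rest

def select_vcpu_bucket_py (requested_vcpus : Int) : Int :=
  if (gcpSizingTable.get? requested_vcpus).isSome then requested_vcpus
  else
    let available := PySem.List.sorted gcpSizingTable.keys id false
    match firstGE requested_vcpus available with
    | some c => c
    | none => (PySem.List.pyGet? available (-1)).getD 0  -- available is nonempty, so getD's default is never used (exact)

-- ===== PORT B =====
-- the while-loop of Source B: bisect_left binary search; lo, hi stay in [0, keys.length]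
def bsearchLoop (keys : List Int) (x : Int) (lo hi : Nat) : Nat :=
  if lo < hi then
    let mid := (lo + hi) / 2   -- (lo + hi) // 2 on nonnegative ints = Nat division (exact)
    if (PySem.List.pyGet? keys (mid : Int)).getD 0 < x then  -- mid < hi ≤ length, so getD's default is never used (exact)
      bsearchLoop keys x (mid + 1) hi
    else
      bsearchLoop keys x lo mid
  else lo
termination_by hi - lo
decreasing_by all_goals omega

def select_vcpu_bucket_py_alt (requested_vcpus : Int) : Int :=
  let keys := PySem.List.sorted gcpSizingTable.keys id false
  let lo := bsearchLoop keys requested_vcpus 0 keys.length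
  if lo < keys.length then (PySem.List.pyGet? keys (lo : Int)).getD 0
  else (PySem.List.pyGet? keys (-1)).getD 0

-- ===== PRECONDITION & SPEC =====
def Spec_select_vcpu_bucket_py (requested_vcpus : Int) (out : Int) : Prop := out = select_vcpu_bucket_py_alt requested_vcpus
instance (requested_vcpus : Int) (out : Int) : Decidable (Spec_select_vcpu_bucket_py requested_vcpus out) := by unfold Spec_select_vcpu_bucket_py; infer_instance

-- ===== CLAIM (what is proved, stated in full; the proofs are below) =====
def Claim_equal_select_vcpu_bucket_py : Prop := ∀ (requested_vcpus : Int), Dom_select_vcpu_bucket_py requested_vcpus → Spec_select_vcpu_bucket_py requested_vcpus (select_vcpu_bucket_py requested_vcpus)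

-- ===== LEMMAS AND PROOFS =====
-- closed form of the for-loop of A on the concrete key list
lemma firstGE_eval (x : Int) :
    firstGE x [1, 2, 4, 8, 16] =
      if x ≤ 1 then some 1 else if x ≤ 2 then some 2 else if x ≤ 4 then some 4
      else if x ≤ 8 then some 8 else if x ≤ 16 then some 16 else none := by
  simp only [firstGE, ge_iff_le]

-- closed form of the binary-search loop of B on the concrete key list
lemma bsearchLoop_eval (x : Int) :
    bsearchLoop [1, 2, 4, 8, 16] x 0 5 =
      if x ≤ 1 then 0 else if x ≤ 2 then 1 else if x ≤ 4 then 2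
      else if x ≤ 8 then 3 else if x ≤ 16 then 4 else 5 := by
  rw [bsearchLoop]
  norm_num [PySem.List.pyGet?, PySem.List.pyIdx?, Int.toNat]
  by_cases h4 : 4 < x
  · rw [if_pos h4, bsearchLoop]
    norm_num [PySem.List.pyGet?, PySem.List.pyIdx?, Int.toNat]
    by_cases h16 : 16 < x
    · rw [if_pos h16, bsearchLoop]
      norm_num
      split_ifs <;> omega
    · rw [if_neg h16, bsearchLoop]
      norm_num [PySem.List.pyGet?, PySem.List.pyIdx?, Int.toNat]
      by_cases h8 : 8 < x
      · rw [if_pos h8, bsearchLoop]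
        norm_num
        split_ifs <;> omega
      · rw [if_neg h8, bsearchLoop]
        norm_num
        split_ifs <;> omega
  · rw [if_neg h4, bsearchLoop]
    norm_num [PySem.List.pyGet?, PySem.List.pyIdx?, Int.toNat]
    by_cases h2 : 2 < x
    · rw [if_pos h2, bsearchLoop]
      norm_num
      split_ifs <;> omega
    · rw [if_neg h2, bsearchLoop]
      norm_num [PySem.List.pyGet?, PySem.List.pyIdx?, Int.toNat]
      by_cases h1 : 1 < x
      · rw [if_pos h1, bsearchLoop]
        norm_num
        split_ifs <;> omega
      · rw [if_neg h1, bsearchLoop]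
        norm_num
        split_ifs <;> omega

lemma sorted_keys_eval :
    PySem.List.sorted (PySem.Dict.keys gcpSizingTable) id false = [1, 2, 4, 8, 16] := by
  decide

-- ===== VERDICT (by name: the statement is the Claim_ definition above) =====
theorem select_vcpu_bucket_py_spec : Claim_equal_select_vcpu_bucket_py := by
  intro n _
  unfold Spec_select_vcpu_bucket_py select_vcpu_bucket_py select_vcpu_bucket_py_alt
  simp only [sorted_keys_eval, List.length_cons, List.length_nil]
  rw [firstGE_eval, show (4 + 1 : Nat) = 5 by rfl, bsearchLoop_eval]
  simp only [gcpSizingTable, PySem.Dict.get?]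
  norm_num
  split_ifs <;> norm_num [PySem.List.pyGet?, PySem.List.pyIdx?, Int.toNat] <;> omega
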